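-- pv_equiv track=rewrite | github.com/Pedrocorgnati/workflow-app | src/workflow_app/templates/quick_templates.py | _same_context_group
-- ===== SOURCE A (Python) =====
-- def _same_context_group(prev_name: str, curr_name: str) -> bool:
--     """True if two commands belong to the same pipeline group (no /clear between them).
--
--     Groups are sub-pipelines where each step feeds into the next and benefits
--     from shared conversation context:
--       - /qa:prep → /qa:trace → /qa:report
--       - /backend:scan → /backend:audit → /backend:test-check → /backend:report
--       - /frontend:scan → /frontend:audit → /frontend:assets-check → /frontend:report
--       - /deep-research-1 → /deep-research-2
--       - /c4-diagram-create → /mermaid-diagram-create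
--
--     NOT grouped: stack review commands (/nextjs:*, /python:*, etc.) — they are
--     independent checks that don't need each other's context.
--     """
--     _PIPELINE_PREFIXES = ("/qa:", "/backend:", "/frontend:")
--     for prefix in _PIPELINE_PREFIXES:
--         if prev_name.startswith(prefix) and curr_name.startswith(prefix):
--             return True
--     if prev_name.startswith("/deep-research") and curr_name.startswith("/deep-research"):
--         return True
--     if "diagram-create" in prev_name and "diagram-create" in curr_name:
--         return True
--     return False
-- ===== SOURCE B (Python) =====
-- def _tags(name: str) -> set:
--     """Set of pipeline-group tags a single command name belongs to."""
--     tags = set()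
--     for prefix, tag in (
--         ("/qa:", "qa"),
--         ("/backend:", "backend"),
--         ("/frontend:", "frontend"),
--         ("/deep-research", "deep-research"),
--     ):
--         if name.startswith(prefix):
--             tags.add(tag)
--     if "diagram-create" in name:
--         tags.add("diagram")
--     return tags
--
--
-- def _same_context_group(prev_name: str, curr_name: str) -> bool:
--     return bool(_tags(prev_name) & _tags(curr_name))
-- ===== Notes on version B (the rewrite author's own statement) =====
-- stated objective: alternative
-- what changed: B featurizes each name independently into a set of group tags and tests set intersection, instead of A's cascade of paired prefix/substring conditions over both names at once.
import Mathlib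
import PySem

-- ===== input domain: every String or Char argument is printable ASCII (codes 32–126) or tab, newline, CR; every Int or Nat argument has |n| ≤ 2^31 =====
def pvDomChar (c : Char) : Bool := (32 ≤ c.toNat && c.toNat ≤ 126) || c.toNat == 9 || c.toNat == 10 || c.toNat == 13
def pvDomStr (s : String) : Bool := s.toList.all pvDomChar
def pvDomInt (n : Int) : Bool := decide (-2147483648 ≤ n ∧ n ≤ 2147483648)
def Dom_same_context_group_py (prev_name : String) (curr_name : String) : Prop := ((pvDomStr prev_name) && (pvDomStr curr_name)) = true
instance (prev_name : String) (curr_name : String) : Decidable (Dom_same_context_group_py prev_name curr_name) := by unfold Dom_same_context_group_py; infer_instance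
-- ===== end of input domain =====

-- B replaces A's cascade of paired conditions by mapping each name independently to a set of group tags and testing set overlap (alternative decomposition, same cost).
-- ===== PORT A =====
-- Port of A: cascade of paired prefix checks, then paired substring checks.
def same_context_group_py (prev_name : String) (curr_name : String) : Bool :=
  if ["/qa:", "/backend:", "/frontend:"].any
      (fun pfx => PySem.Str.startswith prev_name pfx && PySem.Str.startswith curr_name pfx) then
    true
  else if PySem.Str.startswith prev_name "/deep-research" && PySem.Str.startswith curr_name "/deep-research" then
    true
  else if PySem.Str.isIn "diagram-create" prev_name && PySem.Str.isIn "diagram-create" curr_name then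
    true
  else
    false

-- ===== PORT B =====
-- Port of B: map each name to its set of group tags, then test set overlap.
def pvTagsB (name : String) : PySem.Set String :=
  let base := [("/qa:", "qa"), ("/backend:", "backend"), ("/frontend:", "frontend"),
               ("/deep-research", "deep-research")].foldl
    (fun tags pr => if PySem.Str.startswith name pr.1 then PySem.Set.add tags pr.2 else tags)
    PySem.Set.empty
  if PySem.Str.isIn "diagram-create" name then PySem.Set.add base "diagram" else base

def same_context_group_py_alt (prev_name : String) (curr_name : String) : Bool :=
  !(PySem.Set.inter (pvTagsB prev_name) (pvTagsB curr_name)).isEmpty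

-- ===== PRECONDITION & SPEC =====
def Spec_same_context_group_py (prev_name : String) (curr_name : String) (out : Bool) : Prop := out = same_context_group_py_alt prev_name curr_name
instance (prev_name : String) (curr_name : String) (out : Bool) : Decidable (Spec_same_context_group_py prev_name curr_name out) := by unfold Spec_same_context_group_py; infer_instance

-- ===== CLAIM (what is proved, stated in full; the proofs are below) =====
def Claim_equal_same_context_group_py : Prop := ∀ (prev_name : String) (curr_name : String), Dom_same_context_group_py prev_name curr_name → Spec_same_context_group_py prev_name curr_name (same_context_group_py prev_name curr_name)

-- ===== LEMMAS AND PROOFS =====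

-- ===== VERDICT (by name: the statement is the Claim_ definition above) =====
-- proof helpers: both ports as functions of the ten boolean atoms
def pvAOf (a1 a2 a3 b1 b2 b3 c1 c2 d1 d2 : Bool) : Bool :=
  if [(a1, b1), (a2, b2), (a3, b3)].any (fun pr => pr.1 && pr.2) then true
  else if c1 && c2 then true
  else if d1 && d2 then true
  else false

def pvTagsOf (a b c d e : Bool) : PySem.Set String :=
  let base := [("qa", a), ("backend", b), ("frontend", c), ("deep-research", d)].foldl
    (fun tags pr => if pr.2 then PySem.Set.add tags pr.1 else tags) PySem.Set.empty
  if e then PySem.Set.add base "diagram" else base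

theorem tagsB_eq (name : String) :
    pvTagsB name = pvTagsOf (PySem.Str.startswith name "/qa:") (PySem.Str.startswith name "/backend:")
      (PySem.Str.startswith name "/frontend:") (PySem.Str.startswith name "/deep-research")
      (PySem.Str.isIn "diagram-create" name) := rfl

theorem a_eq (p c : String) :
    same_context_group_py p c = pvAOf (PySem.Str.startswith p "/qa:") (PySem.Str.startswith p "/backend:")
      (PySem.Str.startswith p "/frontend:") (PySem.Str.startswith c "/qa:") (PySem.Str.startswith c "/backend:")
      (PySem.Str.startswith c "/frontend:") (PySem.Str.startswith p "/deep-research")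
      (PySem.Str.startswith c "/deep-research") (PySem.Str.isIn "diagram-create" p)
      (PySem.Str.isIn "diagram-create" c) := rfl

theorem key (a1 a2 a3 b1 b2 b3 c1 c2 d1 d2 : Bool) :
    pvAOf a1 a2 a3 b1 b2 b3 c1 c2 d1 d2 =
      !(PySem.Set.inter (pvTagsOf a1 a2 a3 c1 d1) (pvTagsOf b1 b2 b3 c2 d2)).isEmpty := by
  revert a1 a2 a3 b1 b2 b3 c1 c2 d1 d2
  decide

-- ===== VERDICT (by name: the statement is the Claim_ definition above) =====
theorem same_context_group_py_spec : Claim_equal_same_context_group_py := by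
  intro p c _
  unfold Spec_same_context_group_py same_context_group_py_alt
  rw [tagsB_eq, tagsB_eq, a_eq, key]
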